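-- pv_equiv track=rewrite | github.com/Shiv2157k/LeetCode2024 | microsoft_may_redo/hashbuckets/CountUniqueCharactersOfAllSubstringsOfAGivenString.py | count_from_string
-- ===== SOURCE A (Python) =====
-- def count_from_string(s: str) -> int:
--     """
--     Approach: Hash Bucket indices as val
--     T: O(N)
--     S: O(1) -> constant space
--     :param s:
--     :return:
--     """
--
--     mod = 1000000007
--     n = len(s)
--
--     hash_bucket = [[] for _ in range(26)]
--
--     # add left sentinel for all the buckets
--     for i in range(26):
--         hash_bucket[i].append(-1)
--
--     # add indices of the char
--     for index, char in enumerate(s):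
--         hash_bucket[ord(char) - ord('A')].append(index)
--
--     # add right sentinel for all the buckets
--     for i in range(26):
--         hash_bucket[i].append(n)
--
--     count = 0
--
--     for i in range(26):
--         for j in range(1, len(hash_bucket[i]) - 1):
--             p1 = (hash_bucket[i][j] - hash_bucket[i][j - 1])
--             p2 = (hash_bucket[i][j + 1] - hash_bucket[i][j])
--             product = p1 * p2
--             count += product
--     return count % mod
-- ===== SOURCE B (Python) =====
-- def count_from_string(s: str) -> int:
--     n = len(s)
--     last1 = [-1] * 26
--     last2 = [-1] * 26
--     count = 0
--     for i, char in enumerate(s):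
--         k = ord(char) - ord('A')
--         count += (i - last1[k]) * (last1[k] - last2[k])
--         last2[k] = last1[k]
--         last1[k] = i
--     for k in range(26):
--         count += (n - last1[k]) * (last1[k] - last2[k])
--     return count % 1000000007
-- ===== Notes on version B (the rewrite author's own statement) =====
-- stated objective: simpler
-- what changed: Replaced the bucket-of-indices construction (build 26 index lists with sentinels, then a second indexed pass over each bucket) by a single online pass that keeps only the last two occurrence indices per bucket (last1/last2) and adds each contribution as it goes, finishing with one closing pass over the 26 buckets.
import Mathlib
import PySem

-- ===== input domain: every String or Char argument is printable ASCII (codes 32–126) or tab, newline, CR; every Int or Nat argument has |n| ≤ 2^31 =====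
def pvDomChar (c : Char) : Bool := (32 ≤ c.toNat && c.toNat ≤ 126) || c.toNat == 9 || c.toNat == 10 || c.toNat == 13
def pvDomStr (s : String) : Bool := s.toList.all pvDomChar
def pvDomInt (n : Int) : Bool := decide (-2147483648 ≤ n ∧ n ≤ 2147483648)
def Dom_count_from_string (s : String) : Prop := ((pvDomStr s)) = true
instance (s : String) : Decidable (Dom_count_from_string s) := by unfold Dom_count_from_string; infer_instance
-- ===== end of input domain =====

-- B replaces A's 26 index-bucket lists (with sentinels and a second indexed pass) by a single
-- online pass keeping only the last two occurrence indices per bucket; same O(n) cost, simpler.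


-- ===== PORT A =====
def count_from_string (s : String) : Int :=
  let md : Int := 1000000007
  let n : Int := PySem.Str.len s
  let hash_bucket : List (List Int) := (PySem.List.pyRange 0 26 1).map (fun _ => ([] : List Int))
  -- left sentinel
  let hash_bucket := (PySem.List.pyRange 0 26 1).foldl
    (fun hb i => PySem.List.pySetD hb i (PySem.List.pyGetD hb i [] ++ [(-1 : Int)])) hash_bucket
  -- indices of each char (hash_bucket[ord(char)-ord('A')].append(index))
  let hash_bucket := (PySem.List.enumerate s.toList 0).foldl
    (fun hb p =>
      let k : Int := (p.2.toNat : Int) - 65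
      PySem.List.pySetD hb k (PySem.List.pyGetD hb k [] ++ [p.1])) hash_bucket
  -- right sentinel
  let hash_bucket := (PySem.List.pyRange 0 26 1).foldl
    (fun hb i => PySem.List.pySetD hb i (PySem.List.pyGetD hb i [] ++ [n])) hash_bucket
  let count : Int := (PySem.List.pyRange 0 26 1).foldl
    (fun c i =>
      let bi := PySem.List.pyGetD hash_bucket i []
      (PySem.List.pyRange 1 (PySem.List.len bi - 1) 1).foldl
        (fun c2 j =>
          let p1 := PySem.List.pyGetD bi j 0 - PySem.List.pyGetD bi (j - 1) 0
          let p2 := PySem.List.pyGetD bi (j + 1) 0 - PySem.List.pyGetD bi j 0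
          c2 + p1 * p2) c) 0
  PySem.Int.mod count md

-- ===== PORT B =====
def count_from_string_alt (s : String) : Int :=
  let n : Int := PySem.Str.len s
  let st := (PySem.List.enumerate s.toList 0).foldl
    (fun (st : Int × List Int × List Int) p =>
      let k : Int := (p.2.toNat : Int) - 65
      let v1 := PySem.List.pyGetD st.2.1 k 0
      let v2 := PySem.List.pyGetD st.2.2 k 0
      (st.1 + (p.1 - v1) * (v1 - v2),
       PySem.List.pySetD st.2.1 k p.1,
       PySem.List.pySetD st.2.2 k v1))
    ((0 : Int), List.replicate 26 (-1 : Int), List.replicate 26 (-1 : Int))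
  let count := (PySem.List.pyRange 0 26 1).foldl
    (fun c k =>
      let v1 := PySem.List.pyGetD st.2.1 k 0
      let v2 := PySem.List.pyGetD st.2.2 k 0
      c + (n - v1) * (v1 - v2)) st.1
  PySem.Int.mod count 1000000007

-- ===== PRECONDITION & SPEC =====
-- Pre_ excludes exactly the strings containing a character of code < 39 or > 90, on which
-- A's bucket indexing raises IndexError (B raises IndexError on the same inputs).
def Pre_count_from_string (s : String) : Prop :=
  (s.toList.all (fun c => 39 ≤ c.toNat && c.toNat ≤ 90)) = true
instance (s : String) : Decidable (Pre_count_from_string s) := by unfold Pre_count_from_string; infer_instance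
def pvWitness_count_from_string : String := "AB"
def Spec_count_from_string (s : String) (out : Int) : Prop := out = count_from_string_alt s
instance (s : String) (out : Int) : Decidable (Spec_count_from_string s out) := by unfold Spec_count_from_string; infer_instance

-- ===== CLAIM (what is proved, stated in full; the proofs are below) =====
def Claim_equal_count_from_string : Prop := ∀ (s : String), Dom_count_from_string s → Pre_count_from_string s → Spec_count_from_string s (count_from_string s)

-- ===== LEMMAS AND PROOFS =====

-- key of a char: the effective bucket index Python's (possibly negative) ord(c)-65 selects
def keyN (c : Char) : Nat := (c.toNat - 39) % 26

-- positions (as Python indices) of the chars of cs falling in bucket k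
def possK (cs : List Char) (k : Nat) : List Int :=
  ((PySem.List.enumerate cs 0).filter (fun p => keyN p.2 == k)).map (·.1)

-- sum of products of consecutive gaps: W [x0,…,xm] = Σ (x_{j+1}-x_j)(x_j-x_{j-1})
def W : List Int → Int
  | a :: b :: c :: t => (b - a) * (c - b) + W (b :: c :: t)
  | _ => 0

def L1 (q : List Int) : Int := q.getLastD (-1)
def L2 (q : List Int) : Int := q.dropLast.getLastD (-1)

lemma keyN_lt (c : Char) : keyN c < 26 := Nat.mod_lt _ (by omega)

lemma pyIdx_key (t : Nat) (h1 : 39 ≤ t) (h2 : t ≤ 90) :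
    PySem.List.pyIdx? 26 ((t : Int) - 65) = some ((t - 39) % 26) := by
  unfold PySem.List.pyIdx?
  rcases Nat.lt_or_ge t 65 with h | h
  · rw [if_neg (by omega), if_pos (by omega)]
    congr 1
    omega
  · rw [if_pos (by omega), if_pos (by omega)]
    congr 1
    omega

lemma getD_key {α : Type} {l : List α} (hl : l.length = 26) (t : Nat) (h1 : 39 ≤ t)
    (h2 : t ≤ 90) (d : α) :
    PySem.List.pyGetD l ((t : Int) - 65) d = l.getD ((t - 39) % 26) d := by
  unfold PySem.List.pyGetD PySem.List.pyGet?
  rw [hl, pyIdx_key t h1 h2]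
  simp [List.getD_eq_getElem?_getD]

lemma setD_key {α : Type} {l : List α} (hl : l.length = 26) (t : Nat) (h1 : 39 ≤ t)
    (h2 : t ≤ 90) (v : α) :
    PySem.List.pySetD l ((t : Int) - 65) v = l.set ((t - 39) % 26) v := by
  unfold PySem.List.pySetD PySem.List.pySet?
  rw [hl, pyIdx_key t h1 h2]
  rfl

lemma possK_append (p : List Char) (c : Char) (k : Nat) :
    possK (p ++ [c]) k
      = possK p k ++ (if keyN c = k then [(p.length : Int)] else []) := by
  simp only [possK, PySem.List.enumerate_append, PySem.List.enumerate_cons,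
    PySem.List.enumerate_nil, List.filter_append, List.map_append]
  congr 1
  by_cases h : keyN c = k
  · simp [h]
  · simp [h]

lemma W_append_gen (q : List Int) : ∀ (h x : Int),
    W (h :: q ++ [x])
      = W (h :: q) + (x - (h :: q).getLastD 0) *
          ((h :: q).getLastD 0 - (h :: q).dropLast.getLastD ((h :: q).getLastD 0)) := by
  induction q with
  | nil => intro h x; simp [W]
  | cons a q' ih =>
    intro h x
    cases q' with
    | nil => simp [W]; ring
    | cons b q'' =>
      have h1 : W (h :: (a :: b :: q'') ++ [x])
          = (a - h) * (b - a) + W (a :: (b :: q'') ++ [x]) := by simp [W]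
      rw [h1, ih a x]
      simp only [W, List.getLastD_cons, List.dropLast_cons₂]
      cases q'' with
      | nil => simp; ring
      | cons d q₃ =>
        simp only [List.dropLast_cons₂, List.getLastD_cons]
        ring

lemma W_snoc (q : List Int) (x : Int) :
    W ((-1 : Int) :: q ++ [x]) = W ((-1 : Int) :: q) + (x - L1 q) * (L1 q - L2 q) := by
  rw [W_append_gen q (-1) x]
  cases q with
  | nil => simp [L1, L2, W]
  | cons a q' =>
    simp only [L1, L2, List.getLastD_cons,
      List.dropLast_cons_of_ne_nil (List.cons_ne_nil a q')]

-- updating one summand of a range-indexed sum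
lemma sum_map_range_update (n k0 : Nat) (f : Nat → Int) (g : Nat → Int) (δ : Int)
    (hk : k0 < n) (hg : ∀ k, k < n → g k = if k = k0 then f k + δ else f k) :
    ((List.range n).map g).sum = ((List.range n).map f).sum + δ := by
  induction n with
  | zero => omega
  | succ m ih =>
    rw [List.range_succ, List.map_append, List.map_append, List.sum_append, List.sum_append]
    rcases Nat.lt_or_ge k0 m with h | h
    · rw [ih h (fun k hkm => hg k (by omega))]
      have : g m = f m := by rw [hg m (by omega), if_neg (by omega)]
      simp [this]
      ring
    · have hk0 : k0 = m := by omega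
      have hgm : g m = f m + δ := by rw [hg m (by omega), if_pos (by omega)]
      have : ∀ k, k < m → g k = f k := by
        intro k hkm; rw [hg k (by omega), if_neg (by omega)]
      have hsum : ((List.range m).map g).sum = ((List.range m).map f).sum := by
        congr 1
        exact List.map_congr_left (fun k hkm => this k (List.mem_range.mp hkm))
      simp [hsum, hgm]
      ring

-- the triple-gap indexed sum is W
lemma sumW (l : List Int) :
    ((List.range (l.length - 2)).map
      (fun k => (l.getD (k+1) 0 - l.getD k 0) * (l.getD (k+2) 0 - l.getD (k+1) 0))).sum
      = W l := by
  induction l with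
  | nil => simp [W]
  | cons a l' ih =>
    cases l' with
    | nil => simp [W]
    | cons b l'' =>
      cases l'' with
      | nil => simp [W]
      | cons c t =>
        have hlen : (a :: b :: c :: t).length - 2 = t.length + 1 := by simp
        rw [hlen, List.range_succ_eq_map, List.map_cons, List.map_map, List.sum_cons]
        have hW : W (a :: b :: c :: t) = (b - a) * (c - b) + W (b :: c :: t) := rfl
        rw [hW, ← ih]
        have hlen' : (b :: c :: t).length - 2 = t.length := by simp
        rw [hlen']
        congr 1

-- A's inner loop computes W of the bucket
lemma innerA (bi : List Int) (c : Int) :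
    (PySem.List.pyRange 1 (PySem.List.len bi - 1) 1).foldl
      (fun c2 j =>
        c2 + (PySem.List.pyGetD bi j 0 - PySem.List.pyGetD bi (j - 1) 0) *
             (PySem.List.pyGetD bi (j + 1) 0 - PySem.List.pyGetD bi j 0)) c
      = c + W bi := by
  rw [PySem.List.len_eq, PySem.List.pyRange_one, List.foldl_map, PySem.List.foldl_add]
  rw [← sumW bi]
  congr 1
  have hm : ((bi.length : Int) - 1 - 1).toNat = bi.length - 2 := by omega
  rw [hm]
  congr 1
  refine List.map_congr_left (fun k hk => ?_)
  have e1 : (1 : Int) + (k : Int) = ((k + 1 : Nat) : Int) := by push_cast; ring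
  have e2 : (1 : Int) + (k : Int) - 1 = ((k : Nat) : Int) := by ring
  have e3 : (1 : Int) + (k : Int) + 1 = ((k + 2 : Nat) : Int) := by push_cast; ring
  rw [e2, e3, e1, PySem.List.pyGetD_natCast, PySem.List.pyGetD_natCast,
    PySem.List.pyGetD_natCast]

-- the 'append x to every bucket' loop
lemma foldl_setD_append (x : Int) : ∀ (m : Nat) (hb : List (List Int)), m ≤ hb.length →
    (PySem.List.pyRange 0 (m : Int) 1).foldl
      (fun hb i => PySem.List.pySetD hb i (PySem.List.pyGetD hb i [] ++ [x])) hb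
      = (hb.take m).map (· ++ [x]) ++ hb.drop m := by
  intro m
  induction m with
  | zero =>
    intro hb _
    rw [PySem.List.pyRange_one_eq_nil (by norm_num)]
    simp
  | succ m ih =>
    intro hb h
    have hc : ((m + 1 : Nat) : Int) = (m : Int) + 1 := by push_cast; ring
    rw [hc, PySem.List.pyRange_one_succ_right (by positivity), List.foldl_append,
      ih hb (by omega)]
    have hmlt : m < hb.length := by omega
    have hlen : ((hb.take m).map (· ++ [x])).length = m := by
      simp [List.length_take, Nat.min_eq_left (le_of_lt hmlt)]
    have hget : PySem.List.pyGetD ((hb.take m).map (· ++ [x]) ++ hb.drop m) ((m : Int)) [] = hb[m] := by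
      rw [PySem.List.pyGetD_natCast, List.getD_eq_getElem?_getD,
        List.getElem?_append_right (by omega), hlen]
      simp [hmlt]
    simp only [List.foldl_cons, List.foldl_nil]
    rw [hget, PySem.List.pySetD_natCast, List.set_append, if_neg (by omega), hlen]
    rw [List.drop_eq_getElem_cons hmlt, Nat.sub_self, List.set_cons_zero]
    conv_rhs => rw [List.take_add_one]
    simp
    rw [List.getElem?_eq_getElem hmlt]
    simp

def bkts (cs : List Char) : List (List Int) :=
  (List.range 26).map (fun k => (-1 : Int) :: possK cs k)

-- A's index-insertion loop builds the buckets
lemma buildA (cs : List Char) (hpre : ∀ c ∈ cs, 39 ≤ c.toNat ∧ c.toNat ≤ 90) :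
    (PySem.List.enumerate cs 0).foldl
      (fun hb p =>
        PySem.List.pySetD hb ((p.2.toNat : Int) - 65)
          (PySem.List.pyGetD hb ((p.2.toNat : Int) - 65) [] ++ [p.1]))
      (List.replicate 26 [(-1 : Int)])
      = bkts cs := by
  induction cs using List.reverseRecOn with
  | nil => simp [bkts, possK, PySem.List.enumerate_nil, List.map_const']
  | append_singleton p c ih =>
    have hp : ∀ d ∈ p, 39 ≤ d.toNat ∧ d.toNat ≤ 90 := fun d hd => hpre d (by simp [hd])
    have hc := hpre c (by simp)
    rw [PySem.List.enumerate_append, List.foldl_append, ih hp]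
    simp only [PySem.List.enumerate_cons, PySem.List.enumerate_nil, List.foldl_cons,
      List.foldl_nil, zero_add]
    have hlen : (bkts p).length = 26 := by simp [bkts]
    rw [setD_key (l := bkts p) hlen c.toNat hc.1 hc.2,
      getD_key (l := bkts p) hlen c.toNat hc.1 hc.2]
    have hgd : (bkts p).getD ((c.toNat - 39) % 26) [] = (-1 : Int) :: possK p (keyN c) :=
      PySem.List.getD_map_range (fun k => (-1 : Int) :: possK p k) 26 (keyN c) [] (keyN_lt c)
    rw [hgd]
    apply List.ext_getElem
    · simp [bkts]
    intro i h1 h2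
    have hi : i < 26 := by simpa [bkts] using h2
    rw [List.getElem_set]
    simp only [bkts, List.getElem_map, List.getElem_range]
    rw [possK_append]
    by_cases hik : keyN c = i
    · rw [if_pos (by simpa using hik), if_pos hik]
      rw [← hik]
      simp
    · rw [if_neg (by simpa using hik), if_neg hik]
      simp

-- B's online loop invariant
lemma buildB (cs : List Char) (hpre : ∀ c ∈ cs, 39 ≤ c.toNat ∧ c.toNat ≤ 90) :
    (PySem.List.enumerate cs 0).foldl
      (fun (st : Int × List Int × List Int) p =>
        ((st.1 + (p.1 - PySem.List.pyGetD st.2.1 ((p.2.toNat : Int) - 65) 0) *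
            (PySem.List.pyGetD st.2.1 ((p.2.toNat : Int) - 65) 0 -
             PySem.List.pyGetD st.2.2 ((p.2.toNat : Int) - 65) 0),
          PySem.List.pySetD st.2.1 ((p.2.toNat : Int) - 65) p.1,
          PySem.List.pySetD st.2.2 ((p.2.toNat : Int) - 65)
            (PySem.List.pyGetD st.2.1 ((p.2.toNat : Int) - 65) 0))))
      ((0 : Int), List.replicate 26 (-1 : Int), List.replicate 26 (-1 : Int))
      = (((List.range 26).map (fun k => W ((-1 : Int) :: possK cs k))).sum,
         (List.range 26).map (fun k => L1 (possK cs k)),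
         (List.range 26).map (fun k => L2 (possK cs k))) := by
  induction cs using List.reverseRecOn with
  | nil =>
    simp [possK, PySem.List.enumerate_nil, W, L1, L2, List.map_const']
  | append_singleton p c ih =>
    have hp : ∀ d ∈ p, 39 ≤ d.toNat ∧ d.toNat ≤ 90 := fun d hd => hpre d (by simp [hd])
    have hc := hpre c (by simp)
    rw [PySem.List.enumerate_append, List.foldl_append, ih hp]
    simp only [PySem.List.enumerate_cons, PySem.List.enumerate_nil, List.foldl_cons,
      List.foldl_nil, zero_add]
    have hlen1 : ((List.range 26).map (fun k => L1 (possK p k))).length = 26 := by simp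
    have hlen2 : ((List.range 26).map (fun k => L2 (possK p k))).length = 26 := by simp
    rw [getD_key (l := (List.range 26).map (fun k => L1 (possK p k))) hlen1 c.toNat hc.1 hc.2,
      getD_key (l := (List.range 26).map (fun k => L2 (possK p k))) hlen2 c.toNat hc.1 hc.2,
      setD_key (l := (List.range 26).map (fun k => L1 (possK p k))) hlen1 c.toNat hc.1 hc.2,
      setD_key (l := (List.range 26).map (fun k => L2 (possK p k))) hlen2 c.toNat hc.1 hc.2]
    have hg1 : ((List.range 26).map (fun k => L1 (possK p k))).getD ((c.toNat - 39) % 26) 0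
        = L1 (possK p (keyN c)) :=
      PySem.List.getD_map_range (fun k => L1 (possK p k)) 26 (keyN c) 0 (keyN_lt c)
    have hg2 : ((List.range 26).map (fun k => L2 (possK p k))).getD ((c.toNat - 39) % 26) 0
        = L2 (possK p (keyN c)) :=
      PySem.List.getD_map_range (fun k => L2 (possK p k)) 26 (keyN c) 0 (keyN_lt c)
    rw [hg1, hg2]
    refine Prod.ext ?_ (Prod.ext ?_ ?_)
    · show _ + _ = _
      refine (sum_map_range_update 26 (keyN c) (fun k => W ((-1 : Int) :: possK p k))
        (fun k => W ((-1 : Int) :: possK (p ++ [c]) k))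
        (((p.length : Int) - L1 (possK p (keyN c))) *
          (L1 (possK p (keyN c)) - L2 (possK p (keyN c)))) (keyN_lt c) ?_).symm
      intro k hk
      simp only []
      rw [possK_append]
      by_cases hik : k = keyN c
      · subst hik
        rw [if_pos rfl, if_pos rfl]
        rw [show (-1 : Int) :: (possK p (keyN c) ++ [(p.length : Int)])
            = ((-1 : Int) :: possK p (keyN c)) ++ [(p.length : Int)] from rfl]
        rw [W_snoc]
      · rw [if_neg (fun h => hik h.symm), if_neg hik]
        simp
    · show List.set _ _ _ = _
      apply List.ext_getElem
      · simp
      intro i h1 h2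
      have hi : i < 26 := by simpa using h2
      rw [List.getElem_set]
      simp only [List.getElem_map, List.getElem_range]
      rw [possK_append]
      by_cases hik : keyN c = i
      · rw [if_pos (by simpa using hik), if_pos hik]
        simp [L1]
      · rw [if_neg (by simpa using hik), if_neg hik]
        simp
    · show List.set _ _ _ = _
      apply List.ext_getElem
      · simp
      intro i h1 h2
      have hi : i < 26 := by simpa using h2
      rw [List.getElem_set]
      simp only [List.getElem_map, List.getElem_range]
      rw [possK_append]
      by_cases hik : keyN c = i
      · rw [if_pos (by simpa using hik), if_pos hik]
        rw [← hik]
        simp [L1, L2]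
      · rw [if_neg (by simpa using hik), if_neg hik]
        simp

-- both sides equal the same per-bucket gap sum
set_option maxRecDepth 4096 in
lemma countA_eq (s : String) (hpre : Pre_count_from_string s) :
    count_from_string s
      = PySem.Int.mod
          (((List.range 26).map
            (fun k => W ((-1 : Int) :: possK s.toList k ++ [(s.toList.length : Int)]))).sum)
          1000000007 := by
  simp only [count_from_string]
  rw [show (PySem.List.pyRange 0 26 1).foldl
      (fun hb i => PySem.List.pySetD hb i (PySem.List.pyGetD hb i [] ++ [(-1 : Int)]))
      ((PySem.List.pyRange 0 26 1).map (fun _ => ([] : List Int)))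
      = List.replicate 26 [(-1 : Int)] from by decide]
  have hpre' : ∀ c ∈ s.toList, 39 ≤ c.toNat ∧ c.toNat ≤ 90 := by
    intro c hc
    simpa using List.all_eq_true.mp hpre c hc
  rw [buildA s.toList hpre']
  have hsent := foldl_setD_append (PySem.Str.len s) 26 (bkts s.toList) (by simp [bkts])
  push_cast at hsent
  rw [hsent, show (bkts s.toList).take 26 = bkts s.toList from by simp [bkts],
    show (bkts s.toList).drop 26 = [] from by simp [bkts], List.append_nil]
  simp only [innerA]
  rw [PySem.List.pyRange_one 0 26]
  have h26 : ((26 : Int) - 0).toNat = 26 := by decide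
  rw [h26, List.foldl_map]
  simp only [zero_add]
  rw [PySem.List.foldl_add]
  simp only [zero_add]
  congr 1

lemma countB_eq (s : String) (hpre : Pre_count_from_string s) :
    count_from_string_alt s
      = PySem.Int.mod
          (((List.range 26).map
            (fun k => W ((-1 : Int) :: possK s.toList k ++ [(s.toList.length : Int)]))).sum)
          1000000007 := by
  simp only [count_from_string_alt]
  have hpre' : ∀ c ∈ s.toList, 39 ≤ c.toNat ∧ c.toNat ≤ 90 := by
    intro c hc
    simpa using List.all_eq_true.mp hpre c hc
  rw [buildB s.toList hpre']
  simp only []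
  rw [PySem.List.pyRange_one 0 26]
  have h26 : ((26 : Int) - 0).toNat = 26 := by decide
  rw [h26, List.foldl_map]
  simp only [zero_add]
  rw [PySem.List.foldl_add]
  have hmap : (List.range 26).map
      (fun (k : Nat) => (PySem.Str.len s
          - PySem.List.pyGetD ((List.range 26).map (fun k => L1 (possK s.toList k))) ((k : Nat) : Int) 0)
        * (PySem.List.pyGetD ((List.range 26).map (fun k => L1 (possK s.toList k))) ((k : Nat) : Int) 0
          - PySem.List.pyGetD ((List.range 26).map (fun k => L2 (possK s.toList k))) ((k : Nat) : Int) 0))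
      = (List.range 26).map
      (fun k => ((s.toList.length : Int) - L1 (possK s.toList k))
        * (L1 (possK s.toList k) - L2 (possK s.toList k))) := by
    refine List.map_congr_left (fun k hk => ?_)
    have hk26 : k < 26 := List.mem_range.mp hk
    rw [PySem.List.pyGetD_natCast, PySem.List.pyGetD_natCast,
      PySem.List.getD_map_range _ 26 k 0 hk26, PySem.List.getD_map_range _ 26 k 0 hk26,
      PySem.Str.len_eq]
  rw [hmap]
  congr 1
  rw [← PySem.List.sum_map_add_int (List.range 26)
      (fun k => W ((-1 : Int) :: possK s.toList k))
      (fun k => ((s.toList.length : Int) - L1 (possK s.toList k))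
        * (L1 (possK s.toList k) - L2 (possK s.toList k)))]
  congr 1
  refine List.map_congr_left (fun k hk => ?_)
  rw [show (-1 : Int) :: possK s.toList k ++ [(s.toList.length : Int)]
      = ((-1 : Int) :: possK s.toList k) ++ [(s.toList.length : Int)] from rfl, W_snoc]

-- ===== VERDICT (by name: the statement is the Claim_ definition above) =====
theorem count_from_string_spec : Claim_equal_count_from_string := by
  intro s _ hpre
  unfold Spec_count_from_string
  rw [countA_eq s hpre, countB_eq s hpre]
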